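-- pv_equiv track=rewrite | github.com/Braga451/simple-python-crypto | main.py | numberArrayToSymbolic
-- ===== SOURCE A (Python) =====
-- def symbolicStringToList(string : str = ""):
--     return string.replace(" ", "").split(",")
--
-- def numberArrayToSymbolic(num_array : list = [], symbolic_string : str = "") -> str:
--     symbolic_list = symbolicStringToList(symbolic_string)
--     symbols = ["!", "@", "#", "$", "%", "&", "*"]
--     symbolic_dict = generateSymbolicDict(symbolic_list)
--     crypted_array = num_array.copy()
--     for key in symbolic_dict.keys():
--         if key in crypted_array:
--             index_positions = [index for index, x in enumerate(crypted_array) if x == key]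
--             for index in index_positions:
--                 crypted_array[index] = symbolic_dict[key]
--     return crypted_array
--
-- def generateSymbolicDict(symbolic_list : list = []) -> dict:
--     symbols = ["!", "@", "#", "$", "%", "&", "*"]
--     symbolic_dict = {}
--     for x in range(len(symbolic_list)):
--         symbolic_dict[symbolic_list[x]] = symbols[x]
--     return symbolic_dict
-- ===== SOURCE B (Python) =====
-- def symbolicStringToList(string : str = ""):
--     return string.replace(" ", "").split(",")
--
-- def generateSymbolicDict(symbolic_list : list = []) -> dict:
--     symbols = ["!", "@", "#", "$", "%", "&", "*"]
--     symbolic_dict = {}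
--     for x in range(len(symbolic_list)):
--         symbolic_dict[symbolic_list[x]] = symbols[x]
--     return symbolic_dict
--
-- def numberArrayToSymbolic(num_array : list = [], symbolic_string : str = "") -> str:
--     items = list(generateSymbolicDict(symbolicStringToList(symbolic_string)).items())
--     def encode(x):
--         for key, symbol in items:
--             if x == key:
--                 x = symbol
--         return x
--     return [encode(x) for x in num_array]
-- ===== Notes on version B (the rewrite author's own statement) =====
-- stated objective: alternative
-- what changed: A loops over the dict keys and, for each key, does a membership test plus an enumerate scan for positions plus index assignments into a copied array; B makes a single pass over the array, folding each element through the dict's items in insertion order (which reproduces A's sequential key-by-key replacement, including cascades).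
import Mathlib
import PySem

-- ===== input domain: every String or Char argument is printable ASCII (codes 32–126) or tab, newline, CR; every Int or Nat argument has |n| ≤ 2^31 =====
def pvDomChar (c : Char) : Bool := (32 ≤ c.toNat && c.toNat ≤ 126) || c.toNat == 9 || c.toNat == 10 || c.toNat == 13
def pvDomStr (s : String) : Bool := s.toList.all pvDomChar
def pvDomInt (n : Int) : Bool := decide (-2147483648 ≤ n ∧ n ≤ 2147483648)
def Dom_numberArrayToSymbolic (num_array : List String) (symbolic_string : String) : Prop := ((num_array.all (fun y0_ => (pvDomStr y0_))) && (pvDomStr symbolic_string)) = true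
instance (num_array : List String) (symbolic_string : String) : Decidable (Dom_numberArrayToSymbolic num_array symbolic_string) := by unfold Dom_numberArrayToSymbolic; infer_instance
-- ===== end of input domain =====

-- B replaces A's loop over dict keys (each with a membership test, an enumerate scan for
-- positions and index assignments) by a single pass over the array, folding each element
-- through the dict's items; return value only — neither version mutates its arguments.

-- ===== PORT A =====
-- shared helpers: both Python files define these two helpers with identical code
def symbolicStringToListP (string : String) : List String :=
  (PySem.Str.split? (PySem.Str.replace string " " "") ",").getD []

def pvSymbols : List String := ["!", "@", "#", "$", "%", "&", "*"]

def generateSymbolicDictP (symbolic_list : List String) : PySem.Dict String String :=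
  (PySem.List.pyRange 0 symbolic_list.length 1).foldl
    (fun d x => d.insert (PySem.List.pyGetD symbolic_list x "") (PySem.List.pyGetD pvSymbols x ""))
    PySem.Dict.empty

def numberArrayToSymbolic (num_array : List String) (symbolic_string : String) : List String :=
  let symbolic_list := symbolicStringToListP symbolic_string
  let symbolic_dict := generateSymbolicDictP symbolic_list
  symbolic_dict.keys.foldl
    (fun crypted_array key =>
      if crypted_array.contains key then
        let index_positions :=
          ((PySem.List.enumerate crypted_array 0).filter (fun p => p.2 == key)).map (fun p => p.1)
        index_positions.foldl
          (fun a index => PySem.List.pySetD a index (symbolic_dict.getD key "")) crypted_array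
      else crypted_array)
    num_array

-- ===== PORT B =====
def numberArrayToSymbolic_alt (num_array : List String) (symbolic_string : String) : List String :=
  let items := (generateSymbolicDictP (symbolicStringToListP symbolic_string)).items
  num_array.map (fun x => items.foldl (fun y kv => if y == kv.1 then kv.2 else y) x)

-- ===== PRECONDITION & SPEC =====
-- Pre_ excludes exactly the inputs with 7 or more commas in symbolic_string, on which the
-- split yields more than 7 entries and Python A (and B alike) raises IndexError on symbols[x].
def Pre_numberArrayToSymbolic (num_array : List String) (symbolic_string : String) : Prop :=
  PySem.Str.count symbolic_string "," ≤ 6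
instance (num_array : List String) (symbolic_string : String) : Decidable (Pre_numberArrayToSymbolic num_array symbolic_string) := by unfold Pre_numberArrayToSymbolic; infer_instance

def pvWitness_numberArrayToSymbolic : List String × String := (["1", "2", "x"], "1, 2, 3")

def Spec_numberArrayToSymbolic (num_array : List String) (symbolic_string : String) (out : List String) : Prop := out = numberArrayToSymbolic_alt num_array symbolic_string
instance (num_array : List String) (symbolic_string : String) (out : List String) : Decidable (Spec_numberArrayToSymbolic num_array symbolic_string out) := by unfold Spec_numberArrayToSymbolic; infer_instance

-- ===== CLAIM (what is proved, stated in full; the proofs are below) =====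
def Claim_equal_numberArrayToSymbolic : Prop := ∀ (num_array : List String) (symbolic_string : String), Dom_numberArrayToSymbolic num_array symbolic_string → Pre_numberArrayToSymbolic num_array symbolic_string → Spec_numberArrayToSymbolic num_array symbolic_string (numberArrayToSymbolic num_array symbolic_string)

-- ===== LEMMAS AND PROOFS =====

-- setting position pre.length of pre ++ x :: xs
theorem pvSet_mid {α : Type} (pre : List α) (x : α) (xs : List α) (v : α) :
    (pre ++ x :: xs).set pre.length v = pre ++ v :: xs := by
  induction pre with
  | nil => rfl
  | cons p ps ih => simp [ih]

-- A's inner position-scan-and-assign loop is an elementwise map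
theorem pvApply_gen (key v : String) :
    ∀ (xs pre : List String),
      (((PySem.List.enumerate xs (pre.length : Int)).filter (fun p => p.2 == key)).map
          (fun p => p.1)).foldl (fun a index => PySem.List.pySetD a index v) (pre ++ xs)
        = pre ++ xs.map (fun x => if x == key then v else x) := by
  intro xs
  induction xs with
  | nil => intro pre; simp
  | cons x xs ih =>
    intro pre
    by_cases hx : x == key
    · have hxe : x = key := by simpa using hx
      have h1 : PySem.List.pySetD (pre ++ x :: xs) (pre.length : Int) v = pre ++ v :: xs := by
        rw [PySem.List.pySetD_natCast, pvSet_mid]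
      have h2 := ih (pre ++ [v])
      simp only [List.append_assoc, List.singleton_append, List.length_append,
        List.length_singleton] at h2
      simpa [PySem.List.enumerate_cons, hx, hxe, h1, Int.add_comm] using h2
    · have hxn : ¬ x = key := by simpa using hx
      have h2 := ih (pre ++ [x])
      simp only [List.append_assoc, List.singleton_append, List.length_append,
        List.length_singleton] at h2
      simpa [PySem.List.enumerate_cons, hx, hxn, Int.add_comm] using h2

theorem pvApply_eq_map (arr : List String) (key v : String) :
    (((PySem.List.enumerate arr 0).filter (fun p => p.2 == key)).map (fun p => p.1)).foldl
        (fun a index => PySem.List.pySetD a index v) arr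
      = arr.map (fun x => if x == key then v else x) := by
  simpa using pvApply_gen key v arr []

-- the 'if key in crypted_array' guard is redundant: when it fails the map is the identity
theorem pvGuard (arr : List String) (key v : String) :
    (if arr.contains key then arr.map (fun x => if x == key then v else x) else arr)
      = arr.map (fun x => if x == key then v else x) := by
  by_cases h : arr.contains key = true
  · rw [if_pos h]
  · rw [if_neg h]
    have hmem : key ∉ arr := by simpa using h
    have hid : arr.map (fun x => if x == key then v else x) = arr.map id :=
      List.map_congr_left (by
        intro x hx
        have hne : x ≠ key := fun e => hmem (e ▸ hx)
        simp [hne])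
    rw [hid, List.map_id]

-- swapping the loops: folding maps over the array = mapping the per-element fold
theorem pvSwap (l : List (String × String)) :
    ∀ (arr : List String),
      l.foldl (fun a kv => a.map (fun x => if x == kv.1 then kv.2 else x)) arr
        = arr.map (fun x => l.foldl (fun y kv => if y == kv.1 then kv.2 else y) x) := by
  induction l with
  | nil => intro arr; simp
  | cons kv t ih =>
    intro arr
    simp only [List.foldl_cons, ih, List.map_map]
    rfl

-- the generated dict has unique keys
theorem pvNodup (symbolic_list : List String) :
    (generateSymbolicDictP symbolic_list).keys.Nodup := by
  unfold generateSymbolicDictP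
  generalize PySem.List.pyRange 0 (symbolic_list.length : Int) 1 = l
  have : ∀ (l : List Int) (d : PySem.Dict String String), d.keys.Nodup →
      (l.foldl (fun d x => d.insert (PySem.List.pyGetD symbolic_list x "")
        (PySem.List.pyGetD pvSymbols x "")) d).keys.Nodup := by
    intro l
    induction l with
    | nil => intro d h; exact h
    | cons a t ih => intro d h; exact ih _ (PySem.Dict.nodup_keys_insert _ _ _ h)
  exact this l _ PySem.Dict.nodup_keys_empty

-- the whole A-side loop on any dict with unique keys
theorem pvMain (d : PySem.Dict String String) (hnd : d.keys.Nodup) (arr : List String) :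
    d.keys.foldl
      (fun crypted_array key =>
        if crypted_array.contains key then
          (((PySem.List.enumerate crypted_array 0).filter (fun p => p.2 == key)).map
            (fun p => p.1)).foldl
            (fun a index => PySem.List.pySetD a index (d.getD key "")) crypted_array
        else crypted_array) arr
      = arr.map (fun x => d.items.foldl (fun y kv => if y == kv.1 then kv.2 else y) x) := by
  have step1 : d.keys.foldl
      (fun crypted_array key =>
        if crypted_array.contains key then
          (((PySem.List.enumerate crypted_array 0).filter (fun p => p.2 == key)).map
            (fun p => p.1)).foldl
            (fun a index => PySem.List.pySetD a index (d.getD key "")) crypted_array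
        else crypted_array) arr
      = d.keys.foldl
        (fun a key => a.map (fun x => if x == key then d.getD key "" else x)) arr := by
    apply PySem.List.foldl_congr_mem
    intro acc key _
    rw [pvApply_eq_map, pvGuard]
  have step2 : d.keys.foldl
      (fun a key => a.map (fun x => if x == key then d.getD key "" else x)) arr
      = d.items.foldl
        (fun a kv => a.map (fun x => if x == kv.1 then kv.2 else x)) arr := by
    have hkeys : d.keys = d.items.map (fun p => p.1) := rfl
    rw [hkeys, List.foldl_map]
    apply PySem.List.foldl_congr_mem
    intro acc kv hkv
    have hv : d.getD kv.1 "" = kv.2 :=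
      PySem.Dict.getD_of_mem_items d (by simpa using hkv) hnd ""
    rw [hv]
  rw [step1, step2, pvSwap]

-- ===== VERDICT (by name: the statement is the Claim_ definition above) =====
theorem numberArrayToSymbolic_spec : Claim_equal_numberArrayToSymbolic := by
  intro num_array symbolic_string _ _
  exact pvMain (generateSymbolicDictP (symbolicStringToListP symbolic_string))
    (pvNodup _) num_array
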